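-- pv_equiv track=rewrite | github.com/nyreemarsh/pebblepay | backend/app/pdf_generator.py | parse_contract_sections
-- ===== SOURCE A (Python) =====
-- def parse_contract_sections(contract_text: str) -> list:
--     """Parse contract text into sections."""
--     sections = []
--     current_title = None
--     current_content = []
--
--     for line in contract_text.split('\n'):
--         line_stripped = line.strip()
--         is_header = False
--
--         if line_stripped and len(line_stripped) > 2:
--             if line_stripped[0].isdigit() and '.' in line_stripped[:3]:
--                 is_header = True
--             elif line_stripped.isupper() and 3 < len(line_stripped) < 50:
--                 is_header = True
--             elif line_stripped.startswith('===') or line_stripped.startswith('---'):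
--                 continue
--
--         if is_header:
--             if current_title or current_content:
--                 sections.append((current_title, '\n'.join(current_content)))
--             current_title = line_stripped
--             current_content = []
--         elif line_stripped:
--             current_content.append(line_stripped)
--
--     if current_title or current_content:
--         sections.append((current_title, '\n'.join(current_content)))
--
--     return sections
-- ===== SOURCE B (Python) =====
-- def parse_contract_sections(contract_text: str) -> list:
--     """Parse contract text into sections (two-pass: classify lines, then group by headers)."""
--     tokens = []
--     for raw in contract_text.split('\n'):
--         s = raw.strip()
--         if not s:
--             continue
--         if len(s) > 2 and s[0].isdigit() and '.' in s[:3]: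
--             tokens.append((True, s))
--         elif len(s) > 2 and s.isupper() and 3 < len(s) < 50:
--             tokens.append((True, s))
--         elif len(s) > 2 and (s.startswith('===') or s.startswith('---')):
--             pass
--         else:
--             tokens.append((False, s))
--     sections = []
--     i = 0
--     n = len(tokens)
--     while i < n:
--         is_hdr, s = tokens[i]
--         j = i + 1
--         while j < n and not tokens[j][0]:
--             j += 1
--         body = [t[1] for t in tokens[i + 1:j]]
--         if is_hdr:
--             sections.append((s, '\n'.join(body)))
--         else:
--             sections.append((None, '\n'.join([s] + body)))
--         i = j
--     return sections
-- ===== Notes on version B (the rewrite author's own statement) =====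
-- stated objective: alternative
-- what changed: A interleaves header detection with mutable section accumulation in one stateful loop with a trailing flush; B first classifies each line into header/content tokens (dropping blanks and ===/--- rules) and then groups the token list into sections by scanning to the next header, with no flush state.
import Mathlib
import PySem

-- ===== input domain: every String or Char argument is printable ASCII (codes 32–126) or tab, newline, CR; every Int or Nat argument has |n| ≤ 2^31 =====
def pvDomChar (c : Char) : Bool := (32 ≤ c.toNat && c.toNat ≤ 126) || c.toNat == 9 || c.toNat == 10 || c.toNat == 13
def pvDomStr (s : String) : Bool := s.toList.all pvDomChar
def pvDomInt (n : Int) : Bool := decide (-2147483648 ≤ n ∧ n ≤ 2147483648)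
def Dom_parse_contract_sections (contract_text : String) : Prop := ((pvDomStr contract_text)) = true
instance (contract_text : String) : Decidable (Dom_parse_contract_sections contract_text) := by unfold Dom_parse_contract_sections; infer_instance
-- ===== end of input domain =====

-- B restructures A's single stateful flush loop into classify-then-group (alternative decomposition, same cost); equivalence is proved for all inputs.

-- s.isupper() for a whole string: at least one uppercase cased char and no lowercase one (exact on the ASCII domain)
def pvIsUpperStr (s : String) : Bool :=
  s.toList.any PySem.Chars.isupper && !s.toList.any PySem.Chars.islower

-- Python truthiness of the Optional[str] current_title
def pvOptTruthy : Option String → Bool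
  | none => false
  | some s => !(s == "")

-- the three tests A and B both apply to a stripped line (the same Python expressions occur in both sources)
def pvDigitDot (s : String) : Bool :=
  (match PySem.Str.pyGet? s 0 with | some c => PySem.Chars.isdigit c | none => false)
    && PySem.Str.isIn "." (PySem.Str.slice s none (some 3))

def pvUpperHdr (s : String) : Bool :=
  pvIsUpperStr s && (decide ((3 : Int) < PySem.Str.len s) && decide (PySem.Str.len s < (50 : Int)))

def pvRule (s : String) : Bool :=
  PySem.Str.startswith s "===" || PySem.Str.startswith s "---"

-- ===== PORT A =====
-- the 'if is_header:' block of A's loop body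
def pvHeaderAct (st : List (Option String × String) × Option String × List String) (s : String) :
    List (Option String × String) × Option String × List String :=
  ((if pvOptTruthy st.2.1 || !st.2.2.isEmpty then
      st.1 ++ [(st.2.1, PySem.Str.join "\n" st.2.2)] else st.1), some s, [])

-- the 'elif line_stripped:' block of A's loop body
def pvContentAct (st : List (Option String × String) × Option String × List String) (s : String) :
    List (Option String × String) × Option String × List String :=
  (st.1, st.2.1, st.2.2 ++ [s])

-- one iteration of A's for-loop (state = (sections, current_title, current_content))
def pvStepA (st : List (Option String × String) × Option String × List String) (line : String) :
    List (Option String × String) × Option String × List String :=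
  let s := PySem.Str.strip line
  if !(s == "") && decide (2 < PySem.Str.len s) then
    if pvDigitDot s then
      pvHeaderAct st s
    else if pvUpperHdr s then
      pvHeaderAct st s
    else if pvRule s then
      st  -- continue
    else
      pvContentAct st s  -- is_header stayed False, line_stripped truthy
  else if !(s == "") then
    pvContentAct st s
  else
    st

def parse_contract_sections (contract_text : String) : List (Option String × String) :=
  let fin := ((PySem.Str.split? contract_text "\n").getD []).foldl pvStepA ([], none, [])
  if pvOptTruthy fin.2.1 || !fin.2.2.isEmpty then
    fin.1 ++ [(fin.2.1, PySem.Str.join "\n" fin.2.2)]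
  else fin.1

-- ===== PORT B =====
-- pass 1: classify a raw line: none = skipped, some (true, s) = header, some (false, s) = content
def pvClassify (line : String) : Option (Bool × String) :=
  let s := PySem.Str.strip line
  if s == "" then none
  else if decide (2 < PySem.Str.len s) && pvDigitDot s then some (true, s)
  else if decide (2 < PySem.Str.len s) && pvUpperHdr s then some (true, s)
  else if decide (2 < PySem.Str.len s) && pvRule s then none
  else some (false, s)

-- pass 2: group the token list into sections: each chunk runs to the next header token
def pvSections : List (Bool × String) → List (Option String × String)
  | [] => []
  | (true, t) :: rest =>
      (some t, PySem.Str.join "\n" ((rest.takeWhile (fun p => !p.1)).map (·.2))) ::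
        pvSections (rest.dropWhile (fun p => !p.1))
  | (false, s) :: rest =>
      (none, PySem.Str.join "\n" (s :: (rest.takeWhile (fun p => !p.1)).map (·.2))) ::
        pvSections (rest.dropWhile (fun p => !p.1))
  termination_by toks => toks.length
  decreasing_by
    · have := List.length_dropWhile_le (fun p : Bool × String => !p.1) rest
      simp; omega
    · have := List.length_dropWhile_le (fun p : Bool × String => !p.1) rest
      simp; omega

def parse_contract_sections_alt (contract_text : String) : List (Option String × String) :=
  pvSections (((PySem.Str.split? contract_text "\n").getD []).filterMap pvClassify)

-- ===== PRECONDITION & SPEC =====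
def Spec_parse_contract_sections (contract_text : String) (out : List (Option String × String)) : Prop := out = parse_contract_sections_alt contract_text
instance (contract_text : String) (out : List (Option String × String)) : Decidable (Spec_parse_contract_sections contract_text out) := by unfold Spec_parse_contract_sections; infer_instance

-- ===== CLAIM (what is proved, stated in full; the proofs are below) =====
def Claim_equal_parse_contract_sections : Prop := ∀ (contract_text : String), Dom_parse_contract_sections contract_text → Spec_parse_contract_sections contract_text (parse_contract_sections contract_text)

-- ===== LEMMAS AND PROOFS =====

-- A's fold step, expressed on an already-classified token
def pvTokStep (st : List (Option String × String) × Option String × List String)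
    (tok : Bool × String) : List (Option String × String) × Option String × List String :=
  match tok with
  | (true, s) => pvHeaderAct st s
  | (false, s) => pvContentAct st s

-- A's trailing flush
def pvFinalize (st : List (Option String × String) × Option String × List String) :
    List (Option String × String) :=
  if pvOptTruthy st.2.1 || !st.2.2.isEmpty then
    st.1 ++ [(st.2.1, PySem.Str.join "\n" st.2.2)]
  else st.1

-- what finishing the fold from state (title, content) over a token list produces
def pvEmit (title : Option String) (content : List String) (toks : List (Bool × String)) :
    List (Option String × String) :=
  let c := content ++ (toks.takeWhile (fun p => !p.1)).map (·.2)
  (if pvOptTruthy title || !c.isEmpty then [(title, PySem.Str.join "\n" c)] else []) ++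
    pvSections (toks.dropWhile (fun p => !p.1))

theorem pvStepA_eq_tokStep (st : List (Option String × String) × Option String × List String)
    (line : String) :
    pvStepA st line =
      (match pvClassify line with
       | none => st
       | some tok => pvTokStep st tok) := by
  simp only [pvStepA, pvClassify, pvTokStep]
  by_cases he : PySem.Str.strip line = ""
  · simp [he]
  · by_cases hl : 2 < (PySem.Chars.strip line.toList).length
    · cases hd : pvDigitDot (PySem.Str.strip line) <;>
        cases hu : pvUpperHdr (PySem.Str.strip line) <;>
        cases hr : pvRule (PySem.Str.strip line) <;>
        simp [he, hl, hd, hu, hr, PySem.Str.len]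
    · simp [he, hl, PySem.Str.len]

theorem pvFoldA_eq_foldTok (lines : List String)
    (st : List (Option String × String) × Option String × List String) :
    lines.foldl pvStepA st = (lines.filterMap pvClassify).foldl pvTokStep st := by
  induction lines generalizing st with
  | nil => rfl
  | cons l ls ih =>
      simp only [List.foldl_cons, List.filterMap_cons, pvStepA_eq_tokStep]
      cases h : pvClassify l with
      | none => simp [ih]
      | some p => simp [List.foldl_cons, ih]

theorem pv_classify_header_ne_empty (line : String) (s : String)
    (h : pvClassify line = some (true, s)) : s ≠ "" := by
  simp only [pvClassify] at h
  split_ifs at h with h0 <;> simp_all <;>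
    · intro hs; subst hs; simp_all

theorem pv_invariant (toks : List (Bool × String))
    (hh : ∀ p ∈ toks, p.1 = true → p.2 ≠ "")
    (secs : List (Option String × String)) (title : Option String) (content : List String) :
    pvFinalize (toks.foldl pvTokStep (secs, title, content)) =
      secs ++ pvEmit title content toks := by
  induction toks generalizing secs title content with
  | nil =>
      simp only [List.foldl_nil, pvFinalize, pvEmit, pvSections, List.takeWhile, List.dropWhile,
        List.map_nil, List.append_nil]
      split_ifs <;> simp
  | cons p rest ih =>
      obtain ⟨b, s⟩ := p
      cases b with
      | false =>
          have hrec := ih (fun q hq => hh q (List.mem_cons_of_mem _ hq)) secs title (content ++ [s])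
          simp only [List.foldl_cons, pvTokStep, pvContentAct] at hrec ⊢
          rw [hrec]
          simp [pvEmit, List.takeWhile, List.dropWhile, List.append_assoc]
      | true =>
          have hs : s ≠ "" := hh (true, s) List.mem_cons_self rfl
          have hrec := ih (fun q hq => hh q (List.mem_cons_of_mem _ hq))
            (if pvOptTruthy title || !content.isEmpty then
              secs ++ [(title, PySem.Str.join "\n" content)] else secs) (some s) []
          simp only [List.foldl_cons, pvTokStep, pvHeaderAct] at hrec ⊢
          rw [hrec]
          have htr : pvOptTruthy (some s) = true := by
            simp [pvOptTruthy]; exact hs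
          simp only [pvEmit, List.takeWhile, List.dropWhile, Bool.not_true, htr, Bool.true_or,
            List.map_nil, List.append_nil, List.nil_append, List.map, List.isEmpty_nil,
            if_true, List.map_cons]
          rw [pvSections]
          split_ifs <;> simp

theorem pvSections_eq_emit (toks : List (Bool × String)) :
    pvSections toks = pvEmit none [] toks := by
  match toks with
  | [] => simp [pvEmit, pvSections, pvOptTruthy]
  | (true, t) :: rest =>
      simp [pvEmit, pvOptTruthy, List.takeWhile, List.dropWhile]
  | (false, s) :: rest =>
      rw [pvSections]
      simp [pvEmit, pvOptTruthy, List.takeWhile, List.dropWhile]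

-- ===== VERDICT (by name: the statement is the Claim_ definition above) =====
theorem parse_contract_sections_spec : Claim_equal_parse_contract_sections := by
  intro contract_text _
  show parse_contract_sections contract_text = parse_contract_sections_alt contract_text
  unfold parse_contract_sections parse_contract_sections_alt
  have hh : ∀ p ∈ ((PySem.Str.split? contract_text "\n").getD []).filterMap pvClassify,
      (p : Bool × String).1 = true → p.2 ≠ "" := by
    intro p hp hb
    rw [List.mem_filterMap] at hp
    obtain ⟨l, _, hl⟩ := hp
    obtain ⟨b, s⟩ := p
    cases hb
    exact pv_classify_header_ne_empty l s hl
  rw [pvFoldA_eq_foldTok]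
  have hinv := pv_invariant _ hh [] none []
  simp only [pvFinalize] at hinv
  simp only [hinv, List.nil_append, pvSections_eq_emit]
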